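-- pv_equiv track=rewrite | github.com/Vibertexs/Coding-Problems | 2. Medium/Sublist Sum.py | solve
-- ===== SOURCE A (Python) =====
-- def solve(nums):
--
--     summ = sum(nums)
--     counts = 0
--
--     if len(nums) == 1 and summ >= 0:
--         return False
--
--     if summ < 0:
--         return True
--
--
--     for i in nums:
--         counts += i
--         if counts > 0:
--             if counts > summ:
--                 return True
--         else:
--             counts = 0
--
--     return False
-- ===== SOURCE B (Python) =====
-- def solve(nums):
--     prefix = 0
--     minp = 0
--     best = 0
--     for x in nums:
--         prefix += x
--         best = max(best, prefix - minp)
--         minp = min(minp, prefix)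
--     return best > prefix
-- ===== Notes on version B (the rewrite author's own statement) =====
-- stated objective: simpler
-- what changed: Replaced A's special-case branches plus Kadane reset-to-zero accumulator with one uniform pass tracking prefix sum, minimum prefix and best window (best = max(best, prefix - minprefix)), returning best > final prefix.
import Mathlib
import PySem

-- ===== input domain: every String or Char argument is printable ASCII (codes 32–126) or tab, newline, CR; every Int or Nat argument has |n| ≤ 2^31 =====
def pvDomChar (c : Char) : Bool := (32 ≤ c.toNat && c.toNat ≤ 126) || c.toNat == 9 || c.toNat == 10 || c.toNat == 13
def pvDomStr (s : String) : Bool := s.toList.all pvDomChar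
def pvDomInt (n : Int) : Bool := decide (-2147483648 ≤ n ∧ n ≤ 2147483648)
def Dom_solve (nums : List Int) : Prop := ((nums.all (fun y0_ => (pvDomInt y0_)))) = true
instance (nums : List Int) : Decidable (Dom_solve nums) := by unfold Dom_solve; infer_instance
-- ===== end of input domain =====

-- B replaces A's special cases + Kadane reset accumulator by a single uniform
-- prefix-sum / min-prefix pass (simpler; same O(n) cost; return value only).

-- ===== PORT A =====
def solveLoop (xs : List Int) (counts summ : Int) : Bool :=
  match xs with
  | [] => false
  | i :: rest =>
    let counts := counts + i
    if counts > 0 then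
      if counts > summ then true else solveLoop rest counts summ
    else solveLoop rest 0 summ

def solve (nums : List Int) : Bool :=
  let summ := List.foldl (· + ·) 0 nums
  if nums.length = 1 ∧ summ ≥ 0 then false
  else if summ < 0 then true
  else solveLoop nums 0 summ

-- ===== PORT B =====
def solveAltStep (st : Int × Int × Int) (x : Int) : Int × Int × Int :=
  let p := st.1 + x
  let b := max st.2.2 (p - st.2.1)
  let m := min st.2.1 p
  (p, m, b)

def solve_alt (nums : List Int) : Bool :=
  let st := nums.foldl solveAltStep (0, 0, 0)
  decide (st.2.2 > st.1)

-- ===== PRECONDITION & SPEC =====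
def Spec_solve (nums : List Int) (out : Bool) : Prop := out = solve_alt nums
instance (nums : List Int) (out : Bool) : Decidable (Spec_solve nums out) := by unfold Spec_solve; infer_instance

-- ===== CLAIM (what is proved, stated in full; the proofs are below) =====
def Claim_equal_solve : Prop := ∀ (nums : List Int), Dom_solve nums → Spec_solve nums (solve nums)

-- ===== LEMMAS AND PROOFS =====

-- the sequence of Kadane "counts" values A compares against summ, folded by max (0 for []).
def gK : List Int → Int → Int
  | [], _ => 0
  | x :: r, c => max (c + x) (gK r (if c + x > 0 then c + x else 0))

theorem solveLoop_eq (xs : List Int) : ∀ (c s : Int), 0 ≤ s →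
    solveLoop xs c s = decide (gK xs c > s) := by
  induction xs with
  | nil => intro c s hs; simp [solveLoop, gK]; omega
  | cons x r ih =>
    intro c s hs
    simp only [solveLoop, gK]
    by_cases h1 : c + x > 0
    · by_cases h2 : c + x > s
      · have hm : max (c + x) (gK r (if c + x > 0 then c + x else 0)) > s := by omega
        simp [h1, h2, hm]
      · simp only [if_pos h1, if_neg h2, ih _ s hs, decide_eq_decide]
        omega
    · simp only [if_neg h1, ih 0 s hs, decide_eq_decide]
      omega

theorem foldB_fst (xs : List Int) : ∀ (p m b : Int),
    (List.foldl solveAltStep (p, m, b) xs).1 = List.foldl (· + ·) p xs := by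
  induction xs with
  | nil => intro p m b; rfl
  | cons x r ih => intro p m b; simp only [List.foldl, solveAltStep]; exact ih _ _ _

theorem foldB_best (xs : List Int) : ∀ (p m b : Int), 0 ≤ b → m ≤ p →
    (List.foldl solveAltStep (p, m, b) xs).2.2 = max b (gK xs (p - m)) := by
  induction xs with
  | nil => intro p m b hb _; simp [gK]; omega
  | cons x r ih =>
    intro p m b hb hmp
    simp only [List.foldl, solveAltStep, gK]
    rw [ih (p + x) (min m (p + x)) (max b (p + x - m)) (by omega) (by omega)]
    have harg : p + x - min m (p + x) = (if (p - m) + x > 0 then (p - m) + x else (p - m) + x - (p + x - m)) := by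
      split <;> omega
    have harg2 : p + x - min m (p + x) = (if (p - m) + x > 0 then (p - m) + x else 0) := by
      rw [harg]; split <;> omega
    rw [harg2]
    have := le_max_left b (p + x - m)
    have h3 : p - m + x = p + x - m := by ring
    rw [h3]
    omega

theorem solve_alt_char (nums : List Int) :
    solve_alt nums = decide (max 0 (gK nums 0) > List.foldl (· + ·) 0 nums) := by
  simp only [solve_alt, foldB_fst, foldB_best nums 0 0 0 (le_refl 0) (le_refl 0)]
  norm_num

-- ===== VERDICT (by name: the statement is the Claim_ definition above) =====
theorem solve_spec : Claim_equal_solve := by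
  intro nums _
  show solve nums = solve_alt nums
  rw [solve_alt_char]
  simp only [solve]
  set s := List.foldl (· + ·) 0 nums with hs
  by_cases h1 : nums.length = 1 ∧ s ≥ 0
  · obtain ⟨hlen, hpos⟩ := h1
    match nums, hlen with
    | [x], _ =>
      have hx : s = x := by simp [hs]
      rw [if_pos (⟨rfl, hpos⟩ : ([x] : List Int).length = 1 ∧ s ≥ 0)]
      symm
      rw [decide_eq_false_iff_not]
      simp only [gK]
      omega
  · rw [if_neg h1]
    by_cases h2 : s < 0
    · rw [if_pos h2]
      symm
      rw [decide_eq_true_iff]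
      omega
    · rw [if_neg h2, solveLoop_eq nums 0 s (by omega)]
      simp only [decide_eq_decide]
      omega
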